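-- pv_equiv track=rewrite | github.com/motion-emechijam/LeoBook | Neo/selector_manager.py | validate_selector_format
-- ===== SOURCE A (Python) =====
-- def validate_selector_format(selector: str) -> bool:
--     """Basic validation of CSS selector format"""
--     if not selector or not isinstance(selector, str):
--         return False
--
--     # Check for obviously invalid patterns
--     invalid_patterns = [
--         ':contains(',  # Non-standard jQuery selector
--         'skeleton',    # Loading state selectors
--         'ska__',       # Skeleton loading selectors
--     ]
--
--     for pattern in invalid_patterns:
--         if pattern in selector.lower():
--             return False
--
--     return True
-- ===== SOURCE B (Python) =====
-- def validate_selector_format(selector: str) -> bool: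
--     """Basic validation of CSS selector format (single left-to-right scan)."""
--     if not selector or not isinstance(selector, str):
--         return False
--     s = selector.lower()
--     patterns = (':contains(', 'skeleton', 'ska__')
--     return not any(s.startswith(p, i) for i in range(len(s)) for p in patterns)
-- ===== Notes on version B (the rewrite author's own statement) =====
-- stated objective: alternative
-- what changed: Replaced the three separate whole-string substring-membership scans of the lowercased selector by one explicit left-to-right scan that at each position checks whether any of the three invalid patterns starts there, keeping the same initial guard.
import Mathlib
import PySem

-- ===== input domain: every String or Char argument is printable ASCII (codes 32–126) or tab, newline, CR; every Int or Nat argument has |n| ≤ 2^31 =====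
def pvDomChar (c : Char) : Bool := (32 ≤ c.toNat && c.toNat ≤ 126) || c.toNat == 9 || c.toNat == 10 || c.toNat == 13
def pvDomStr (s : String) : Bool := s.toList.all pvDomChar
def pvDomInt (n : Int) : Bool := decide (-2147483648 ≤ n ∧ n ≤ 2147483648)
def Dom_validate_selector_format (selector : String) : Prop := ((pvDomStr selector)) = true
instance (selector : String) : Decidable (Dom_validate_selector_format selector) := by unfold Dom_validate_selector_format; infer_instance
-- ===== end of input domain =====

-- ===== PORT A =====
def validate_selector_format (selector : String) : Bool :=
  if selector = "" then false
  else
    -- for pattern in invalid_patterns: if pattern in selector.lower(): return False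
    if [":contains(", "skeleton", "ska__"].any
        (fun pattern => PySem.Str.isIn pattern (PySem.Str.lower selector)) then false
    else true

-- ===== PORT B =====
def validate_selector_format_alt (selector : String) : Bool :=
  if selector = "" then false
  else
    let s := PySem.Chars.lower selector.toList
    let patterns := [":contains(".toList, "skeleton".toList, "ska__".toList]
    -- not any(s.startswith(p, i) for i in range(len(s)) for p in patterns)
    !((List.range s.length).any (fun i =>
        patterns.any (fun p => PySem.Chars.startswith (s.drop i) p)))

-- ===== PRECONDITION & SPEC =====
def Spec_validate_selector_format (selector : String) (out : Bool) : Prop := out = validate_selector_format_alt selector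
instance (selector : String) (out : Bool) : Decidable (Spec_validate_selector_format selector out) := by unfold Spec_validate_selector_format; infer_instance

-- ===== CLAIM (what is proved, stated in full; the proofs are below) =====
def Claim_equal_validate_selector_format : Prop := ∀ (selector : String), Dom_validate_selector_format selector → Spec_validate_selector_format selector (validate_selector_format selector)

-- ===== LEMMAS AND PROOFS =====
-- A nonempty pattern occurs as a substring iff it starts at some position < length.
theorem isIn_iff_exists_lt {sub t : List Char} (hsub : sub ≠ []) :
    PySem.Chars.isIn sub t = true ↔ ∃ i < t.length, PySem.Chars.startswith (t.drop i) sub = true := by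
  rw [← PySem.Chars.exists_prefix_drop_iff_isIn]
  constructor
  · rintro ⟨j, hj⟩
    refine ⟨j, ?_, ?_⟩
    · by_contra h
      push Not at h
      rw [List.drop_eq_nil_of_le h] at hj
      exact hsub (List.prefix_nil.mp hj)
    · exact (PySem.Chars.startswith_iff _ _).mpr hj
  · rintro ⟨i, _, hi⟩
    exact ⟨i, (PySem.Chars.startswith_iff _ _).mp hi⟩

-- (if c then false else true) = true ↔ !d = true, reduced to c ↔ d on Bool.
theorem pv_ite_not_iff (c d : Bool) :
    ((if c = true then false else true) = true ↔ (!d) = true) ↔ (c = true ↔ d = true) := by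
  cases c <;> cases d <;> simp
-- ===== VERDICT (by name: the statement is the Claim_ definition above) =====
set_option maxRecDepth 4000 in
theorem validate_selector_format_spec : Claim_equal_validate_selector_format := by
  intro selector _
  unfold Spec_validate_selector_format validate_selector_format validate_selector_format_alt
  split
  · rfl
  · rw [Bool.eq_iff_iff, pv_ite_not_iff]
    simp only [List.any_eq_true, List.mem_range]
    constructor
    · rintro ⟨p, hp, hin⟩
      have hne : p.toList ≠ [] := by
        fin_cases hp <;> decide
      rw [PySem.Str.isIn_iff_infix, ← PySem.Chars.isIn_iff_infix] at hin
      rw [PySem.Str.toList_lower] at hin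
      obtain ⟨i, hilt, hst⟩ := (isIn_iff_exists_lt hne).mp hin
      exact ⟨i, hilt, p.toList, by fin_cases hp <;> simp, hst⟩
    · rintro ⟨i, hilt, p, hp, hst⟩
      have : ∃ q : String, q ∈ [":contains(", "skeleton", "ska__"] ∧ q.toList = p := by
        fin_cases hp <;> exact ⟨_, by simp, rfl⟩
      obtain ⟨q, hq, rfl⟩ := this
      refine ⟨q, hq, ?_⟩
      have hne : q.toList ≠ [] := by fin_cases hq <;> decide
      rw [PySem.Str.isIn_iff_infix, ← PySem.Chars.isIn_iff_infix, PySem.Str.toList_lower]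
      exact (isIn_iff_exists_lt hne).mpr ⟨i, hilt, hst⟩
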